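-- pv_equiv track=rewrite | github.com/xkazm04/actor | src/templates/contract.py | _group_findings
-- ===== SOURCE A (Python) =====
-- from typing import List, Dict, Any, Optional
--
-- def _group_findings(findings: List[Dict[str, Any]]) -> Dict[str, List[Dict[str, Any]]]:
--     """Group findings with contract-specific priority order."""
--     # Order emphasizes risk and fraud indicators
--     order = ["red_flag", "suspicious_element", "connected_entity", "compliance_issue",
--              "pricing_analysis", "bid_process", "contract_terms", "performance_issue",
--              "comparable_contract", "contract_entity", "date_timeline", "gap"]
--     grouped: Dict[str, List[Dict[str, Any]]] = {}
--
--     for ftype in order: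
--         type_findings = [f for f in findings if f.get("finding_type") == ftype]
--         if type_findings:
--             grouped[ftype] = type_findings
--
--     # Add any remaining types not in order
--     for f in findings:
--         ftype = f.get("finding_type", "other")
--         if ftype not in grouped:
--             if ftype not in grouped:
--                 grouped[ftype] = []
--             grouped[ftype].append(f)
--
--     return grouped
-- ===== SOURCE B (Python) =====
-- def _group_findings(findings):
--     """Group findings with contract-specific priority order.
--
--     Single pass over findings instead of one filter pass per priority type;
--     like the original, only the first finding of each non-priority type is kept.
--     """
--     order = ["red_flag", "suspicious_element", "connected_entity", "compliance_issue",
--              "pricing_analysis", "bid_process", "contract_terms", "performance_issue",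
--              "comparable_contract", "contract_entity", "date_timeline", "gap"]
--     priority = {}   # priority type -> all its findings, in input order
--     extras = {}     # non-priority type -> first finding of that type
--     for f in findings:
--         t = f.get("finding_type", "other")
--         if t in order:
--             priority.setdefault(t, []).append(f)
--         else:
--             if t not in extras:
--                 extras[t] = f
--     result = {t: priority[t] for t in order if t in priority}
--     for t, f in extras.items():
--         result[t] = [f]
--     return result
-- ===== Notes on version B (the rewrite author's own statement) =====
-- stated objective: alternative
-- what changed: A scans the findings list once per priority type (12 filter passes) plus a leftover pass; B makes a single pass routing each finding into a priority-groups dict or a first-extra dict, then assembles the result from the fixed order list and the extras.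
import Mathlib
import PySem

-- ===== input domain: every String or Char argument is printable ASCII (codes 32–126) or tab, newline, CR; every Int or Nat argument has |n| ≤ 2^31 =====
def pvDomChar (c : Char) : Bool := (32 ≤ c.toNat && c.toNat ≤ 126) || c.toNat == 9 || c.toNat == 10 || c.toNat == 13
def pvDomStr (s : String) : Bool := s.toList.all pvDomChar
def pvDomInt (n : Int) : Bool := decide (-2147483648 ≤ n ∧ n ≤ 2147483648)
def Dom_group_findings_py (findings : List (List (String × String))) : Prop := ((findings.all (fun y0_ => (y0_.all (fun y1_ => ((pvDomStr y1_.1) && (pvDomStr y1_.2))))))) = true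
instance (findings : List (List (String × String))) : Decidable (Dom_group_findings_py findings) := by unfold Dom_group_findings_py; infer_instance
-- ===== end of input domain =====

-- B groups in a single pass over findings where A does one filter pass per priority type plus a leftover pass;
-- like A, only the first finding of each non-priority type is kept.

-- the fixed priority order (shared literal of both Pythons)
def gfOrder : List String :=
  ["red_flag", "suspicious_element", "connected_entity", "compliance_issue",
   "pricing_analysis", "bid_process", "contract_terms", "performance_issue",
   "comparable_contract", "contract_entity", "date_timeline", "gap"]

-- ===== PORT A =====
def group_findings_py (findings : List (List (String × String))) : List (String × List (List (String × String))) :=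
  -- for ftype in order: type_findings = [f for f in findings if f.get("finding_type") == ftype]; if type_findings: grouped[ftype] = type_findings
  let grouped : PySem.Dict String (List (List (String × String))) :=
    gfOrder.foldl (fun g ftype =>
      let type_findings := findings.filter (fun f => (PySem.Dict.mk f).get? "finding_type" == some ftype)
      if type_findings ≠ [] then g.insert ftype type_findings else g) PySem.Dict.empty
  -- for f in findings: ftype = f.get("finding_type", "other"); if ftype not in grouped: grouped[ftype] = []; grouped[ftype].append(f)
  let grouped :=
    findings.foldl (fun g f =>
      let ftype := (PySem.Dict.mk f).getD "finding_type" "other"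
      if g.contains ftype then g
      else
        let g' := g.insert ftype []
        g'.insert ftype (g'.getD ftype [] ++ [f])) grouped
  grouped.items

-- ===== PORT B =====
-- t = f.get("finding_type", "other")
def gfKey (f : List (String × String)) : String := (PySem.Dict.mk f).getD "finding_type" "other"

def group_findings_py_alt (findings : List (List (String × String))) : List (String × List (List (String × String))) :=
  -- one pass: priority.setdefault(t, []).append(f)  /  if t not in extras: extras[t] = f
  let pe :=
    findings.foldl (fun (pe : PySem.Dict String (List (List (String × String))) × PySem.Dict String (List (String × String))) f =>
      let t := gfKey f
      if t ∈ gfOrder then (pe.1.modify t [] (· ++ [f]), pe.2)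
      else if pe.2.contains t then pe else (pe.1, pe.2.insert t f))
      (PySem.Dict.empty, PySem.Dict.empty)
  -- result = {t: priority[t] for t in order if t in priority}
  let result : PySem.Dict String (List (List (String × String))) :=
    gfOrder.foldl (fun r t => if pe.1.contains t then r.insert t (pe.1.getD t []) else r) PySem.Dict.empty
  -- for t, f in extras.items(): result[t] = [f]
  let result := pe.2.items.foldl (fun r p => r.insert p.1 [p.2]) result
  result.items

-- ===== PRECONDITION & SPEC =====
def Spec_group_findings_py (findings : List (List (String × String))) (out : List (String × List (List (String × String)))) : Prop := out = group_findings_py_alt findings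
instance (findings : List (List (String × String))) (out : List (String × List (List (String × String)))) : Decidable (Spec_group_findings_py findings out) := by unfold Spec_group_findings_py; infer_instance

-- ===== CLAIM (what is proved, stated in full; the proofs are below) =====
def Claim_equal_group_findings_py : Prop := ∀ (findings : List (List (String × String))), Dom_group_findings_py findings → Spec_group_findings_py findings (group_findings_py findings)

-- ===== LEMMAS AND PROOFS =====

-- the list of (type, first finding) pairs A's leftover loop appends and B's extras dict collects
def gfFirsts (fs : List (List (String × String))) (seen : List String) : List (String × List (String × String)) :=
  match fs with
  | [] => []
  | f :: rest =>
    let t := gfKey f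
    if t ∈ gfOrder ∨ t ∈ seen then gfFirsts rest seen else (t, f) :: gfFirsts rest (t :: seen)
theorem gfKey_eq_iff (t : String) (ht : t ∈ gfOrder) (f : List (String × String)) :
    ((PySem.Dict.mk f).get? "finding_type" == some t) = (gfKey f == t) := by
  have hto : t ≠ "other" := by rintro rfl; revert ht; decide
  unfold gfKey
  rw [PySem.Dict.getD_eq_get?_getD]
  cases h : (PySem.Dict.mk f).get? "finding_type" with
  | none => simp [Option.getD]; exact fun h => hto h.symm
  | some s => simp [Option.getD]
theorem foldl_insert_if_items {ν : Type} (ts : List String) (p : String → Prop) [DecidablePred p]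
    (v : String → ν) (d : PySem.Dict String ν)
    (hnd : ts.Nodup) (hfresh : ∀ t ∈ ts, d.contains t = false) :
    (ts.foldl (fun g t => if p t then g.insert t (v t) else g) d).items
      = d.items ++ (ts.filter (fun t => decide (p t))).map (fun t => (t, v t)) := by
  induction ts generalizing d with
  | nil => simp
  | cons t ts ih =>
    obtain ⟨hnt, hnd⟩ := List.nodup_cons.mp hnd
    simp only [List.foldl_cons]
    by_cases hp : p t
    · rw [if_pos hp]
      rw [ih _ hnd ?fresh]
      · rw [PySem.Dict.items_insert_of_not_contains _ _ (hfresh t (by simp))]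
        simp [hp]
      case fresh =>
        intro t' ht'
        rw [PySem.Dict.contains_insert]
        have hne : t' ≠ t := fun h => hnt (h ▸ ht')
        simp [hne, hfresh t' (List.mem_cons_of_mem _ ht')]
    · rw [if_neg hp, ih _ hnd (fun t' ht' => hfresh t' (List.mem_cons_of_mem _ ht'))]
      simp [hp]

theorem foldl_insert_if_contains {ν : Type} (ts : List String) (p : String → Prop) [DecidablePred p]
    (v : String → ν) (d : PySem.Dict String ν) (t' : String) :
    (ts.foldl (fun g t => if p t then g.insert t (v t) else g) d).contains t'
      = (d.contains t' || (ts.filter (fun t => decide (p t))).contains t') := by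
  induction ts generalizing d with
  | nil => simp
  | cons t ts ih =>
    simp only [List.foldl_cons]
    by_cases hp : p t
    · rw [if_pos hp, ih]
      rw [PySem.Dict.contains_insert]
      simp [hp]
      by_cases h : t' = t
      · simp [h]
      · have : (t' == t) = false := by simp [h]
        simp [this, h]
    · rw [if_neg hp, ih]
      simp [hp]
def gfStepP (d : PySem.Dict String (List (List (String × String)))) (f : List (String × String)) :
    PySem.Dict String (List (List (String × String))) :=
  if gfKey f ∈ gfOrder then d.modify (gfKey f) [] (· ++ [f]) else d

def gfStepE (e : PySem.Dict String (List (String × String))) (f : List (String × String)) :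
    PySem.Dict String (List (String × String)) :=
  if gfKey f ∈ gfOrder then e else if e.contains (gfKey f) then e else e.insert (gfKey f) f

theorem gf_pair_foldl (fs : List (List (String × String)))
    (d : PySem.Dict String (List (List (String × String)))) (e : PySem.Dict String (List (String × String))) :
    fs.foldl (fun pe f =>
      let t := gfKey f
      if t ∈ gfOrder then (pe.1.modify t [] (· ++ [f]), pe.2)
      else if pe.2.contains t then pe else (pe.1, pe.2.insert t f)) (d, e)
      = (fs.foldl gfStepP d, fs.foldl gfStepE e) := by
  induction fs generalizing d e with
  | nil => rfl
  | cons f fs ih =>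
    simp only [List.foldl_cons]
    rw [show (if gfKey f ∈ gfOrder then ((d, e).1.modify (gfKey f) [] (· ++ [f]), (d, e).2)
        else if (d, e).2.contains (gfKey f) then (d, e) else ((d, e).1, (d, e).2.insert (gfKey f) f))
        = (gfStepP d f, gfStepE e f) from ?_, ih]
    unfold gfStepP gfStepE
    by_cases h1 : gfKey f ∈ gfOrder
    · simp [h1]
    · by_cases h2 : e.contains (gfKey f) <;> simp [h1, h2]

theorem gf_prio_getD (fs : List (List (String × String))) (d : PySem.Dict String (List (List (String × String))))
    (t : String) (ht : t ∈ gfOrder) :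
    (fs.foldl gfStepP d).getD t [] = d.getD t [] ++ fs.filter (fun f => gfKey f == t) := by
  induction fs generalizing d with
  | nil => simp
  | cons f fs ih =>
    simp only [List.foldl_cons, List.filter_cons]
    rw [ih]
    unfold gfStepP
    by_cases h1 : gfKey f ∈ gfOrder
    · rw [if_pos h1, PySem.Dict.getD_modify]
      by_cases h2 : t = gfKey f
      · simp [h2]
      · have hb : (gfKey f == t) = false := by simp; exact fun h => h2 h.symm
        simp [h2, hb]
    · have h2 : (gfKey f == t) = false := by
        refine beq_eq_false_iff_ne.mpr ?_
        rintro rfl; exact h1 ht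
      rw [if_neg h1]
      simp [h2]

theorem gf_prio_contains (fs : List (List (String × String))) (d : PySem.Dict String (List (List (String × String))))
    (t : String) (ht : t ∈ gfOrder) :
    (fs.foldl gfStepP d).contains t = (d.contains t || fs.any (fun f => gfKey f == t)) := by
  induction fs generalizing d with
  | nil => simp
  | cons f fs ih =>
    simp only [List.foldl_cons, List.any_cons]
    rw [ih]
    unfold gfStepP
    by_cases h1 : gfKey f ∈ gfOrder
    · rw [if_pos h1, PySem.Dict.contains_modify]
      by_cases h2 : t = gfKey f
      · simp [h2]
      · have hb : (t == gfKey f) = false := by simp [h2]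
        have hb' : (gfKey f == t) = false := by simp; exact fun h => h2 h.symm
        simp [hb, hb']
    · have h2 : (gfKey f == t) = false := by
        refine beq_eq_false_iff_ne.mpr ?_
        rintro rfl; exact h1 ht
      rw [if_neg h1]
      simp [h2]
theorem ne_key_of_mem_items_not_contains {ν : Type} (d : PySem.Dict String ν)
    {p : String × ν} (hp : p ∈ d.items) {t : String} (hc : d.contains t = false) : p.1 ≠ t := by
  intro h
  have := (PySem.Dict.contains_iff_mem_keys d t).mpr (h ▸ PySem.Dict.mem_keys_of_mem_items d hp)
  rw [hc] at this; exact Bool.false_ne_true this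

theorem gf_extras_items (fs : List (List (String × String))) (e : PySem.Dict String (List (String × String)))
    (seen : List String)
    (hc : ∀ t, e.contains t = (t ∈ seen : Bool)) :
    (fs.foldl gfStepE e).items = e.items ++ gfFirsts fs seen := by
  induction fs generalizing e seen with
  | nil => simp [gfFirsts]
  | cons f fs ih =>
    simp only [List.foldl_cons]
    rw [gfFirsts]
    by_cases h1 : gfKey f ∈ gfOrder
    · rw [if_pos (Or.inl h1)]
      have : gfStepE e f = e := if_pos h1
      rw [this, ih e seen hc]
    · by_cases h2 : gfKey f ∈ seen
      · rw [if_pos (Or.inr h2)]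
        have hce : e.contains (gfKey f) = true := by rw [hc]; simp [h2]
        have : gfStepE e f = e := by unfold gfStepE; rw [if_neg h1, if_pos hce]
        rw [this, ih e seen hc]
      · rw [if_neg (by simp [h1, h2])]
        have hce : e.contains (gfKey f) = false := by rw [hc]; simp [h2]
        have : gfStepE e f = e.insert (gfKey f) f := by unfold gfStepE; rw [if_neg h1, if_neg (by simp [hce])]
        rw [this, ih (e.insert (gfKey f) f) (gfKey f :: seen) ?hc']
        · rw [PySem.Dict.items_insert_of_not_contains _ _ hce]
          simp
        case hc' =>
          intro t'
          rw [PySem.Dict.contains_insert, hc]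
          by_cases h3 : t' = gfKey f <;> simp [h3]

theorem gf_leftover_items (fs : List (List (String × String))) (g : PySem.Dict String (List (List (String × String))))
    (seen : List String)
    (hg : ∀ f ∈ fs, g.contains (gfKey f) = (gfKey f ∈ gfOrder ∨ gfKey f ∈ seen : Bool)) :
    (fs.foldl (fun g f =>
      if g.contains ((PySem.Dict.mk f).getD "finding_type" "other") then g
      else
        (g.insert ((PySem.Dict.mk f).getD "finding_type" "other") []).insert
          ((PySem.Dict.mk f).getD "finding_type" "other")
          ((g.insert ((PySem.Dict.mk f).getD "finding_type" "other") []).getD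
            ((PySem.Dict.mk f).getD "finding_type" "other") [] ++ [f])) g).items
      = g.items ++ (gfFirsts fs seen).map (fun p => (p.1, [p.2])) := by
  induction fs generalizing g seen with
  | nil => simp [gfFirsts]
  | cons f fs ih =>
    simp only [List.foldl_cons]
    rw [gfFirsts]
    have hkey : (PySem.Dict.mk f).getD "finding_type" "other" = gfKey f := rfl
    by_cases h1 : gfKey f ∈ gfOrder ∨ gfKey f ∈ seen
    · have hcg : g.contains (gfKey f) = true := by rw [hg f (by simp)]; simpa using h1
      rw [if_pos h1]
      simp only [hkey, hcg, if_pos]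
      exact ih g seen (fun f' hf' => hg f' (List.mem_cons_of_mem _ hf'))
    · have hcg : g.contains (gfKey f) = false := by rw [hg f (by simp)]; simpa using h1
      rw [if_neg h1]
      simp only [hkey, hcg, Bool.false_eq_true, if_false]
      set t := gfKey f with htdef
      have hstep : ((g.insert t []).insert t ((g.insert t []).getD t [] ++ [f])).items
          = g.items ++ [(t, [f])] := by
        rw [PySem.Dict.getD_insert_self]
        rw [PySem.Dict.items_insert_of_contains _ _ (PySem.Dict.contains_insert_self g t [])]
        rw [PySem.Dict.items_insert_of_not_contains _ _ hcg]
        rw [List.map_append]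
        congr 1
        · conv_rhs => rw [← List.map_id g.items]
          refine List.map_congr_left ?_
          intro p hp
          have hne : p.1 ≠ t := ne_key_of_mem_items_not_contains g hp hcg
          simp [hne]
        · simp
      rw [ih _ (t :: seen) ?hg', hstep]
      · simp
      case hg' =>
        intro f' hf'
        rw [PySem.Dict.contains_insert, PySem.Dict.contains_insert, hg f' (List.mem_cons_of_mem _ hf')]
        by_cases h3 : gfKey f' = t <;> simp [h3]

theorem gfFirsts_keys (fs : List (List (String × String))) (seen : List String) :
    (∀ p ∈ gfFirsts fs seen, p.1 ∉ gfOrder ∧ p.1 ∉ seen) ∧ ((gfFirsts fs seen).map (·.1)).Nodup := by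
  induction fs generalizing seen with
  | nil => simp [gfFirsts]
  | cons f fs ih =>
    rw [gfFirsts]
    by_cases h1 : gfKey f ∈ gfOrder ∨ gfKey f ∈ seen
    · rw [if_pos h1]; exact ih seen
    · rw [if_neg h1]
      rw [not_or] at h1
      obtain ⟨ihm, ihnd⟩ := ih (gfKey f :: seen)
      constructor
      · intro p hp
        rcases List.mem_cons.mp hp with rfl | hp
        · exact ⟨h1.1, h1.2⟩
        · have := ihm p hp
          exact ⟨this.1, fun hs => this.2 (List.mem_cons_of_mem _ hs)⟩
      · rw [List.map_cons, List.nodup_cons]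
        refine ⟨fun hmem => ?_, ihnd⟩
        obtain ⟨p, hp, hp1⟩ := List.mem_map.mp hmem
        exact (ihm p hp).2 (hp1 ▸ List.mem_cons_self)

theorem foldl_insert_singleton_items (ps : List (String × List (String × String)))
    (r : PySem.Dict String (List (List (String × String))))
    (hnd : (ps.map (·.1)).Nodup) (hfresh : ∀ p ∈ ps, r.contains p.1 = false) :
    (ps.foldl (fun r p => r.insert p.1 [p.2]) r).items = r.items ++ ps.map (fun p => (p.1, [p.2])) := by
  induction ps generalizing r with
  | nil => simp
  | cons p ps ih =>
    rw [List.map_cons, List.nodup_cons] at hnd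
    simp only [List.foldl_cons]
    rw [ih _ hnd.2 ?fresh]
    · rw [PySem.Dict.items_insert_of_not_contains _ _ (hfresh p (by simp))]
      simp
    case fresh =>
      intro q hq
      rw [PySem.Dict.contains_insert]
      have hne : q.1 ≠ p.1 := fun h => hnd.1 (h ▸ List.mem_map_of_mem hq)
      simp [hne, hfresh q (List.mem_cons_of_mem _ hq)]
theorem group_findings_py_spec : Claim_equal_group_findings_py := by
  intro findings _
  show group_findings_py findings = group_findings_py_alt findings
  simp only [group_findings_py_alt]
  rw [gf_pair_foldl]
  simp only [group_findings_py]
  rw [gf_extras_items findings PySem.Dict.empty [] (by simp)]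
  rw [gf_leftover_items findings _ [] ?hgA]
  case hgA =>
    intro f hf
    rw [foldl_insert_if_contains]
    by_cases ht : gfKey f ∈ gfOrder
    · have hpred : ((PySem.Dict.mk f).get? "finding_type" == some (gfKey f)) = true := by
        rw [gfKey_eq_iff _ ht f]; simp
      simp [ht]
      exact ⟨f, hf, by simpa using hpred⟩
    · simp [ht]
  have hempty : (PySem.Dict.empty : PySem.Dict String (List (String × String))).items = [] := rfl
  rw [hempty, List.nil_append]
  rw [foldl_insert_singleton_items _ _ (gfFirsts_keys findings []).2 ?fresh]
  case fresh =>
    intro p hp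
    rw [foldl_insert_if_contains]
    have hpo : p.1 ∉ gfOrder := ((gfFirsts_keys findings []).1 p hp).1
    simp [hpo]
  rw [foldl_insert_if_items gfOrder _ _ _ (by decide) (by simp)]
  rw [foldl_insert_if_items gfOrder _ _ _ (by decide) (by simp)]
  have hempty2 : (PySem.Dict.empty : PySem.Dict String (List (List (String × String)))).items = [] := rfl
  rw [hempty2, List.nil_append, List.nil_append]
  congr 1
  have hgetD : ∀ t ∈ gfOrder, (List.foldl gfStepP PySem.Dict.empty findings).getD t []
      = List.filter (fun f => (PySem.Dict.mk f).get? "finding_type" == some t) findings := by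
    intro t ht
    rw [gf_prio_getD findings _ t ht]
    rw [List.filter_congr (fun f _ => (gfKey_eq_iff t ht f).symm)]
    simp [PySem.Dict.getD_empty]
  have hcont : ∀ t ∈ gfOrder, decide ((List.foldl gfStepP PySem.Dict.empty findings).contains t = true)
      = decide (List.filter (fun f => (PySem.Dict.mk f).get? "finding_type" == some t) findings ≠ []) := by
    intro t ht
    rw [gf_prio_contains findings _ t ht]
    rw [show List.filter (fun f => (PySem.Dict.mk f).get? "finding_type" == some t) findings
        = List.filter (fun f => gfKey f == t) findings from List.filter_congr (fun f _ => gfKey_eq_iff t ht f)]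
    simp [List.any_eq_true, List.filter_eq_nil_iff]
  rw [List.filter_congr hcont]
  refine (List.map_congr_left ?_).symm
  intro t htf
  have ht : t ∈ gfOrder := (List.mem_filter.mp htf).1
  rw [hgetD t ht]
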